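-- pv_equiv track=rewrite | github.com/ryought/dbgphmm | scripts/kir/unique_kmer.py | unique_kmers_in_ref
-- ===== SOURCE A (Python) =====
-- def unique_kmers_in_ref(ref, asm):
--     n_unique_kmers = 0
--     n_unique_kmers_contained = 0
--     for kmer, occ in ref.items():
--         if len(occ) == 1:
--             n_unique_kmers += 1
--             if kmer in asm:
--                 n_unique_kmers_contained += 1
--     return n_unique_kmers, n_unique_kmers_contained
-- ===== SOURCE B (Python) =====
-- def unique_kmers_in_ref(ref, asm):
--     n_unique_kmers = sum(1 for occ in ref.values() if len(occ) == 1)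
--     n_unique_kmers_contained = sum(1 for kmer in asm if len(ref.get(kmer, ())) == 1)
--     return n_unique_kmers, n_unique_kmers_contained
-- ===== Notes on version B (the rewrite author's own statement) =====
-- stated objective: alternative
-- what changed: Inverts the traversal for the contained count: instead of iterating ref and testing each unique kmer for membership in asm, B iterates over asm and looks each of its kmers up in ref, counting those whose occurrence list is a singleton; the unique count becomes a one-line sum over ref.values().
import Mathlib
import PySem

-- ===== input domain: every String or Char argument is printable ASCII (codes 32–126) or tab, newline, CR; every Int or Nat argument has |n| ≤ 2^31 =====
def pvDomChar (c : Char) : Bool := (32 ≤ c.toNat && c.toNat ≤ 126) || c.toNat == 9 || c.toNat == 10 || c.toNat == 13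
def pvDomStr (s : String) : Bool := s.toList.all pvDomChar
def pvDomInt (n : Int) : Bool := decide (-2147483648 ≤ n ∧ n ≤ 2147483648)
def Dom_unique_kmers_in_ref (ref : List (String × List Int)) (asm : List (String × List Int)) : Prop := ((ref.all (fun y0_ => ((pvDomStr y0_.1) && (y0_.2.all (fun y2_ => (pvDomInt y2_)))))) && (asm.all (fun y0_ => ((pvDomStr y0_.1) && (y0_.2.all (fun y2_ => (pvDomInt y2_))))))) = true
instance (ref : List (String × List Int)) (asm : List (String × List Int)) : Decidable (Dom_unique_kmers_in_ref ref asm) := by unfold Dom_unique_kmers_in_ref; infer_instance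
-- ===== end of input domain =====

-- B inverts the traversal: the contained count is computed by iterating over asm and
-- looking each kmer up in ref (objective: alternative, same cost). Return-value
-- equivalence, proved under Pre_: both inputs stand for Python dicts, whose key lists
-- are necessarily duplicate-free.


-- ===== PORT A =====
-- for kmer, occ in ref.items(): if len(occ) == 1: n += 1; if kmer in asm: m += 1
-- ('kmer in asm' on a dict is key membership: any key of asm equals kmer)
def unique_kmers_in_ref (ref : List (String × List Int)) (asm : List (String × List Int)) : Int × Int :=
  ref.foldl
    (fun (acc : Int × Int) p =>
      if PySem.List.len p.2 == 1 then
        (acc.1 + 1, if asm.any (fun q => q.1 == p.1) then acc.2 + 1 else acc.2)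
      else acc)
    (0, 0)

-- ===== PORT B =====
-- n_unique_kmers = sum(1 for occ in ref.values() if len(occ) == 1)
-- n_unique_kmers_contained = sum(1 for kmer in asm if len(ref.get(kmer, ())) == 1)
-- (ref.get is a first-match key lookup; List.lookup is exactly that on the assoc list;
--  the 0/1-generator sums are the lengths of the filtered lists)
def unique_kmers_in_ref_alt (ref : List (String × List Int)) (asm : List (String × List Int)) : Int × Int :=
  let n_unique : Int := ((ref.map Prod.snd).filter (fun occ => PySem.List.len occ == 1)).length
  let n_contained : Int :=
    ((asm.map Prod.fst).filter (fun kmer =>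
        match List.lookup kmer ref with
        | some occ => PySem.List.len occ == 1
        | none => false)).length
  (n_unique, n_contained)

-- ===== PRECONDITION & SPEC =====
-- Pre_ requires the key lists of ref and of asm to be pairwise distinct: both arguments
-- stand for Python dicts, whose keys are necessarily distinct, so this excludes no input
-- the Python A can receive.
def Pre_unique_kmers_in_ref (ref : List (String × List Int)) (asm : List (String × List Int)) : Prop :=
  (ref.map Prod.fst).Nodup ∧ (asm.map Prod.fst).Nodup
instance (ref : List (String × List Int)) (asm : List (String × List Int)) : Decidable (Pre_unique_kmers_in_ref ref asm) := by unfold Pre_unique_kmers_in_ref; infer_instance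
def pvWitness_unique_kmers_in_ref : (List (String × List Int)) × (List (String × List Int)) :=
  ([("ab", [1]), ("cd", [1, 2]), ("ef", [3])], [("ab", [1]), ("zz", [])])

def Spec_unique_kmers_in_ref (ref : List (String × List Int)) (asm : List (String × List Int)) (out : Int × Int) : Prop := out = unique_kmers_in_ref_alt ref asm
instance (ref : List (String × List Int)) (asm : List (String × List Int)) (out : Int × Int) : Decidable (Spec_unique_kmers_in_ref ref asm out) := by unfold Spec_unique_kmers_in_ref; infer_instance

-- ===== CLAIM =====
def Claim_equal_unique_kmers_in_ref : Prop := ∀ (ref : List (String × List Int)) (asm : List (String × List Int)), Dom_unique_kmers_in_ref ref asm → Pre_unique_kmers_in_ref ref asm → Spec_unique_kmers_in_ref ref asm (unique_kmers_in_ref ref asm)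

-- ===== LEMMAS AND PROOFS =====

-- A's fold, started at any accumulator, adds the number of unique kmers and the number of
-- those whose key occurs among asm's keys.
theorem uk_fold_spec (asm : List (String × List Int)) :
    ∀ (ref : List (String × List Int)) (a b : Int),
      ref.foldl
        (fun (acc : Int × Int) p =>
          if PySem.List.len p.2 == 1 then
            (acc.1 + 1, if asm.any (fun q => q.1 == p.1) then acc.2 + 1 else acc.2)
          else acc)
        (a, b)
      = (a + ((ref.filter (fun p => PySem.List.len p.2 == 1)).map Prod.fst).length,
         b + (((ref.filter (fun p => PySem.List.len p.2 == 1)).map Prod.fst).filter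
                (fun k => (asm.map Prod.fst).contains k)).length) := by
  intro ref
  induction ref with
  | nil => intro a b; simp
  | cons p ref ih =>
    intro a b
    simp only [List.foldl_cons, List.filter_cons]
    by_cases h1 : (PySem.List.len p.2 == 1) = true
    · have hc : ((asm.map Prod.fst).contains p.1) = (asm.any fun q => q.1 == p.1) := by
        simp [List.any_eq, List.mem_map]
      by_cases h2 : (asm.any fun q => q.1 == p.1) = true
      all_goals
        simp only [h1, h2, if_true, if_false, Bool.false_eq_true, ih, List.map_cons,
          List.filter_cons, hc, List.length_cons, Prod.mk.injEq]
        push_cast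
        constructor <;> first | omega | trivial
    · simp only [h1, Bool.false_eq_true, if_false, ih]

-- For duplicate-free lists, counting the elements of L1 that lie in L2 equals counting
-- the elements of L2 that lie in L1: both are the cardinality of the intersection.
theorem uk_count_inter_comm (L1 L2 : List String) (h1 : L1.Nodup) (h2 : L2.Nodup) :
    (L1.filter (fun k => L2.contains k)).length = (L2.filter (fun k => L1.contains k)).length := by
  have key : ∀ (A B : List String), A.Nodup → B.Nodup →
      (A.filter (fun k => B.contains k)).length = (A.toFinset ∩ B.toFinset).card := by
    intro A B hA hB
    rw [← List.toFinset_card_of_nodup (hA.filter _)]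
    congr 1
    ext x
    simp [Finset.mem_inter]
  rw [key L1 L2 h1 h2, key L2 L1 h2 h1, Finset.inter_comm]

-- Under a duplicate-free key list, B's lookup condition is exactly membership in the
-- list of unique kmers of ref.
theorem uk_lookup_iff (ref : List (String × List Int)) (hnd : (ref.map Prod.fst).Nodup)
    (k : String) :
    (match List.lookup k ref with
     | some occ => PySem.List.len occ == 1
     | none => false)
    = ((ref.filter (fun p => PySem.List.len p.2 == 1)).map Prod.fst).contains k := by
  induction ref with
  | nil => simp [List.lookup]
  | cons p ref ih =>
    have hnd' : (ref.map Prod.fst).Nodup := (List.nodup_cons.mp hnd).2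
    have hknot : p.1 ∉ ref.map Prod.fst := (List.nodup_cons.mp hnd).1
    have hlc : List.lookup k (p :: ref)
        = if (k == p.1) = true then some p.2 else List.lookup k ref := by
      by_cases h : (k == p.1) = true <;> simp [List.lookup, h]
    rw [hlc]
    by_cases hk : (k == p.1) = true
    · have hk' : k = p.1 := beq_iff_eq.mp hk
      by_cases h1 : p.2.length = 1
      · simp [h1, hk']
      · have hnot : k ∉ (ref.filter (fun p => PySem.List.len p.2 == 1)).map Prod.fst := by
          intro hmem
          obtain ⟨q, hq, hqe⟩ := List.mem_map.mp hmem
          exact hknot (hk' ▸ hqe ▸ List.mem_map.mpr ⟨q, (List.mem_filter.mp hq).1, rfl⟩)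
        simp only [PySem.List.len] at hnot
        simp [hk, h1, hnot, Nat.cast_eq_one]
    · have hk2 : ¬ k = p.1 := by simpa using hk
      have ih' := ih hnd'
      simp only [PySem.List.len] at ih'
      by_cases h1 : p.2.length = 1 <;>
        simp [hk, h1, hk2, ih']

-- ===== VERDICT =====
theorem unique_kmers_in_ref_spec : Claim_equal_unique_kmers_in_ref := by
  intro ref asm _ hpre
  obtain ⟨hr, ha⟩ := hpre
  unfold Spec_unique_kmers_in_ref unique_kmers_in_ref unique_kmers_in_ref_alt
  rw [uk_fold_spec]
  have hfst : ((ref.filter (fun p => PySem.List.len p.2 == 1)).map Prod.fst).length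
      = ((ref.map Prod.snd).filter (fun occ => PySem.List.len occ == 1)).length := by
    rw [List.filter_map]; simp [Function.comp_def]
  have hndU : ((ref.filter (fun p => PySem.List.len p.2 == 1)).map Prod.fst).Nodup :=
    (List.Sublist.map Prod.fst (List.filter_sublist (l := ref))).nodup hr
  have hsnd :
      (((ref.filter (fun p => PySem.List.len p.2 == 1)).map Prod.fst).filter
          (fun k => (asm.map Prod.fst).contains k)).length
      = ((asm.map Prod.fst).filter (fun kmer =>
            match List.lookup kmer ref with
            | some occ => PySem.List.len occ == 1
            | none => false)).length := by
    rw [uk_count_inter_comm _ _ hndU ha]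
    congr 1
    apply List.filter_congr
    intro k _
    exact (uk_lookup_iff ref hr k).symm
  simp only [hfst, hsnd, zero_add]
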